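-- pv_equiv track=rewrite | github.com/hynoes/baekjoon | bj1009b3.py | myab
-- ===== SOURCE A (Python) =====
-- def myab(a, b):
--     rtn = a;
--     if (a == 0):
--         return (10);
--     for i in range (1,b):
--         rtn *= a;
--         rtn %= 10;
--     return (rtn);
-- ===== SOURCE B (Python) =====
-- def myab(a, b):
--     if a == 0:
--         return 10
--     if b <= 1:
--         return a
--     return pow(a % 10, 2 + (b - 2) % 4, 10)
-- ===== Notes on version B (the rewrite author's own statement) =====
-- stated objective: faster
-- what changed: Replaced the O(b) repeated-multiplication loop by an O(1) closed form using the length-4 cycle of last digits: pow(a%10, 2+(b-2)%4, 10), keeping A's a==0->10 and b<=1->a behaviour.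
import Mathlib
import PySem

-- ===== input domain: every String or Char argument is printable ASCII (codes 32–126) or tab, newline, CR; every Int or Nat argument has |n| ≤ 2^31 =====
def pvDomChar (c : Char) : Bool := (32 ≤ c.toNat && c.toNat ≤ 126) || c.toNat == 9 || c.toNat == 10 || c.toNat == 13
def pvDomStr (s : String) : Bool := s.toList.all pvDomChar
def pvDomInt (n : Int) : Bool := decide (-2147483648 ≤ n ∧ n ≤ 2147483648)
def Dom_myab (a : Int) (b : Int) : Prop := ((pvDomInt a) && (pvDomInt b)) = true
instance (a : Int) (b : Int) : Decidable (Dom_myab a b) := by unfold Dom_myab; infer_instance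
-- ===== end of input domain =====

-- B replaces A's O(b) multiply-and-reduce loop by an O(1) last-digit cycle lookup (objective: faster).

-- ===== PORT A =====
def myab (a : Int) (b : Int) : Int :=
  if a = 0 then 10
  else (PySem.List.pyRange 1 b 1).foldl (fun rtn _ => PySem.Int.mod (rtn * a) 10) a

-- ===== PORT B =====
def myab_alt (a : Int) (b : Int) : Int :=
  if a = 0 then 10
  else if b ≤ 1 then a
  else PySem.Int.mod ((PySem.Int.mod a 10) ^ (2 + PySem.Int.mod (b - 2) 4).toNat) 10

-- ===== PRECONDITION & SPEC =====
def Spec_myab (a : Int) (b : Int) (out : Int) : Prop := out = myab_alt a b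
instance (a : Int) (b : Int) (out : Int) : Decidable (Spec_myab a b out) := by unfold Spec_myab; infer_instance

-- ===== CLAIM (what is proved, stated in full; the proofs are below) =====
def Claim_equal_myab : Prop := ∀ (a : Int) (b : Int), Dom_myab a b → Spec_myab a b (myab a b)

-- ===== LEMMAS AND PROOFS =====

-- folding a function that ignores the list elements is iteration
theorem pvFoldlConstIter {α β : Type} (g : α → α) (l : List β) (init : α) :
    List.foldl (fun r _ => g r) init l = g^[l.length] init := by
  induction l generalizing init with
  | nil => rfl
  | cons x xs ih => simp [List.foldl, ih, Function.iterate_succ_apply]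

-- A's loop computes a^(k+2) mod 10 after k+1 iterations
theorem pvIterPow (a : Int) (k : Nat) :
    (fun r => (r * a) % 10)^[k + 1] a = a ^ (k + 2) % 10 := by
  induction k with
  | zero => norm_num [pow_succ]
  | succ k ih =>
    rw [Function.iterate_succ_apply', ih]
    show ((a ^ (k + 2) % 10) * a) % 10 = a ^ (k + 3) % 10
    conv_lhs => rw [Int.mul_emod]
    rw [Int.emod_emod_of_dvd _ dvd_rfl, ← Int.mul_emod, ← pow_succ]

theorem pvPowFive (d : Int) : d ^ 5 % 10 = d % 10 := by
  have hp : d ^ 5 % 10 = (d % 10) ^ 5 % 10 :=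
    Int.ModEq.pow 5 ((Int.emod_emod_of_dvd d dvd_rfl).symm)
  rw [hp]
  have h0 : 0 ≤ d % 10 := Int.emod_nonneg d (by norm_num)
  have h1 : d % 10 < 10 := Int.emod_lt_of_pos d (by norm_num)
  set r := d % 10 with hr
  interval_cases r <;> decide

theorem pvPowCycle (d : Int) (j q : Nat) (hj : 1 ≤ j) :
    d ^ (j + 4 * q) % 10 = d ^ j % 10 := by
  induction q with
  | zero => simp
  | succ q ih =>
    have h1 : j + 4 * (q + 1) = (j + 4 * q - 1) + 5 := by omega
    have h2 : j + 4 * q - 1 + 1 = j + 4 * q := by omega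
    calc d ^ (j + 4 * (q + 1)) % 10
        = d ^ (j + 4 * q - 1) * d ^ 5 % 10 := by rw [h1, pow_add]
      _ = ((d ^ (j + 4 * q - 1)) % 10 * (d ^ 5 % 10)) % 10 := Int.mul_emod _ _ _
      _ = ((d ^ (j + 4 * q - 1)) % 10 * (d % 10)) % 10 := by rw [pvPowFive]
      _ = (d ^ (j + 4 * q - 1) * d) % 10 := (Int.mul_emod _ _ _).symm
      _ = d ^ (j + 4 * q) % 10 := by rw [← pow_succ, h2]
      _ = d ^ j % 10 := ih

-- ===== VERDICT (by name: the statement is the Claim_ definition above) =====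
theorem myab_spec : Claim_equal_myab := by
  intro a b _
  unfold Spec_myab myab myab_alt
  have hm : ∀ x : Int, PySem.Int.mod x 10 = x % 10 :=
    fun x => PySem.Int.mod_eq_emod_of_pos (by norm_num)
  have hm4 : ∀ x : Int, PySem.Int.mod x 4 = x % 4 :=
    fun x => PySem.Int.mod_eq_emod_of_pos (by norm_num)
  by_cases ha : a = 0
  · simp [ha]
  · simp only [ha, if_false, hm, hm4]
    by_cases hb : b ≤ 1
    · rw [PySem.List.pyRange_one_eq_nil hb]
      simp [hb]
    · have hb2 : 2 ≤ b := by omega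
      simp only [if_neg hb]
      set t : Nat := (b - 2).toNat with htdef
      have ht : (t : Int) = b - 2 := by omega
      have hlen : (PySem.List.pyRange 1 b 1).length = t + 1 := by
        rw [PySem.List.length_pyRange_one]; omega
      rw [pvFoldlConstIter (fun r => (r * a) % 10) _ a, hlen, pvIterPow a t]
      have he : (2 + (b - 2) % 4).toNat = 2 + t % 4 := by omega
      rw [he]
      have hp : a ^ (t + 2) % 10 = (a % 10) ^ (t + 2) % 10 :=
        Int.ModEq.pow (t + 2) ((Int.emod_emod_of_dvd a dvd_rfl).symm)
      rw [hp]
      have hsplit : t + 2 = (2 + t % 4) + 4 * (t / 4) := by omega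
      rw [hsplit, pvPowCycle (a % 10) (2 + t % 4) (t / 4) (by omega)]
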